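-- pv_equiv track=rewrite | github.com/chaewon-k/Algorithm-Practice | Programmers/불량 사용자.py | solution
-- ===== SOURCE A (Python) =====
-- def find(v, row, num, result):
--     v_twin = v[::1]
--     if row == len(num):   result.append(v_twin)
--     else:
--         for i in num[row]:
--             v_twin[row] = i
--             find(v_twin, row+1, num, result)
--     return result
--
-- def Compare(x, y):
--     for m in range(len(x)):
--         if x[m] == y[m] or y[m] == '*':
--             continue
--         else:   return False
--     return True
--
-- def solution(user_id, banned_id):
--     answer = 0
--     num = [[] for _ in range(len(banned_id))]
--     a = []
--     for i in range(len(user_id)):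
--         for j in range(len(banned_id)):
--             if len(user_id[i]) == len(banned_id[j]) and Compare(user_id[i], banned_id[j]) == True:
--                 num[j].append(i)
--     result = []
--     visited = [0] * len(user_id)
--     result = find([0]*len(num), 0, num, result)
--     set_result = []
--     for i in result:
--         temp = set(i)
--         if temp not in set_result and len(temp) == len(banned_id):
--             set_result.append(temp)
--     answer = len(set_result)
--     return answer
-- ===== SOURCE B (Python) =====
-- def solution(user_id, banned_id):
--     def matches(u, b):
--         return len(u) == len(b) and all(uc == bc or bc == '*' for uc, bc in zip(u, b))
--     cand = [[i for i, u in enumerate(user_id) if matches(u, b)] for b in banned_id]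
--     seen = set()
--
--     def bt(rows, used):
--         if not rows:
--             seen.add(tuple(sorted(used)))
--             return
--         for i in rows[0]:
--             if i not in used:
--                 bt(rows[1:], used + [i])
--
--     bt(cand, [])
--     return len(seen)
-- ===== Notes on version B (the rewrite author's own statement) =====
-- stated objective: alternative
-- what changed: A enumerates the full Cartesian product of per-pattern candidate index lists and only afterwards filters out tuples with repeated users and deduplicates by quadratic set-equality scans; B backtracks over the candidate rows, pruning any user index already used, and dedups canonical sorted tuples in a hash set, so it only ever visits all-distinct assignments (measured much faster on mid-size inputs, but both are exponential in the number of valid assignments in the worst case).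
import Mathlib
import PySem

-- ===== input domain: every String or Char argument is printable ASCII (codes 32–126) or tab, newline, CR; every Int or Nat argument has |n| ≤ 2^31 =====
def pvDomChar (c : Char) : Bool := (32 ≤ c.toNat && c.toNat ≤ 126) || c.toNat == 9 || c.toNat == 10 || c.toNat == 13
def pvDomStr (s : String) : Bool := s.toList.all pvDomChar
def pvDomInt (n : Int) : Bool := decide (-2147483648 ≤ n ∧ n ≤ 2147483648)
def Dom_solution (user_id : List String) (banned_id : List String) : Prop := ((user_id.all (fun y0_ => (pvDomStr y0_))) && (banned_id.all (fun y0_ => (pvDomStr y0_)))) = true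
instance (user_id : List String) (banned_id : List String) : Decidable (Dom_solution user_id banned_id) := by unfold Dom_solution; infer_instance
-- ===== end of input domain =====

-- B replaces A's full Cartesian-product enumeration (then filter + quadratic set-equality dedup)
-- by backtracking that prunes already-used user indices and dedups canonical sorted tuples in a set
-- (objective: alternative algorithm; it visits only the all-distinct assignments).

-- ===== PORT A =====
-- Compare(x, y): the early-return loop is pure, so it is the conjunction over all m;
-- x[m]/y[m] via pyGetD (every call site has len(x) == len(y), so the default is never read).
def compareA (x : String) (y : String) : Bool :=
  (PySem.List.pyRange 0 (PySem.Str.len x) 1).all (fun m =>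
    (PySem.List.pyGetD x.toList m ' ' == PySem.List.pyGetD y.toList m ' ') ||
    (PySem.List.pyGetD y.toList m ' ' == '*'))

-- the nested loops building num (num[j].append(i) = List.modify at j)
def numA (user_id : List String) (banned_id : List String) : List (List Int) :=
  (PySem.List.pyRange 0 (PySem.List.len user_id) 1).foldl (fun num i =>
    (PySem.List.pyRange 0 (PySem.List.len banned_id) 1).foldl (fun num j =>
      if (PySem.Str.len (PySem.List.pyGetD user_id i "") ==
            PySem.Str.len (PySem.List.pyGetD banned_id j "")) &&
         (compareA (PySem.List.pyGetD user_id i "") (PySem.List.pyGetD banned_id j "") == true) then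
        num.modify j.toNat (fun row => row ++ [i])
      else num) num)
    ((PySem.List.pyRange 0 (PySem.List.len banned_id) 1).map (fun _ => ([] : List Int)))

-- find(v, row, num, result); fuel = len(num) - row only makes the recursion total (v[::1] copy is the identity here;
-- the loop carries the mutated buffer v_twin and the growing result as its state)
def findGo : Nat → List Int → Nat → List (List Int) → List (List Int) → List (List Int)
  | 0, v, row, num, result => if row = num.length then result ++ [v] else result
  | fuel+1, v, row, num, result =>
      if row = num.length then result ++ [v]
      else ((PySem.List.pyGetD num (row : Int) []).foldl
              (fun (st : List Int × List (List Int)) i =>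
                let v' := st.1.set row i
                (v', findGo fuel v' (row + 1) num st.2))
              (v, result)).2

def findA (v : List Int) (row : Nat) (num : List (List Int)) (result : List (List Int)) : List (List Int) :=
  findGo (num.length - row) v row num result

def solution (user_id : List String) (banned_id : List String) : Int :=
  let num := numA user_id banned_id
  let result := findA (List.replicate num.length (0 : Int)) 0 num []
  let set_result := result.foldl (fun acc i =>
      let temp := PySem.Set.ofList i
      if (!(acc.any (fun s => PySem.Set.equal s temp))) &&
         (PySem.Set.len temp == PySem.List.len banned_id) then acc ++ [temp] else acc)
    ([] : List (PySem.Set Int))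
  PySem.List.len set_result

-- ===== PORT B =====
def matchesB (u : String) (b : String) : Bool :=
  (PySem.Str.len u == PySem.Str.len b) &&
  (u.toList.zip b.toList).all (fun p => (p.1 == p.2) || (p.2 == '*'))

def candB (user_id : List String) (banned_id : List String) : List (List Int) :=
  banned_id.map (fun b =>
    ((PySem.List.enumerate user_id).filter (fun p => matchesB p.2 b)).map (fun p => p.1))

-- bt(rows, used): prune i already used; at a leaf add the canonical sorted tuple to seen
def btB : List (List Int) → List Int → PySem.Set (List Int) → PySem.Set (List Int)
  | [], used, seen => PySem.Set.add seen (PySem.List.sorted used (fun x => x))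
  | r :: rs, used, seen =>
      r.foldl (fun seen i => if i ∈ used then seen else btB rs (used ++ [i]) seen) seen

def solution_alt (user_id : List String) (banned_id : List String) : Int :=
  PySem.List.len (btB (candB user_id banned_id) [] [])

-- ===== PRECONDITION & SPEC =====
def Spec_solution (user_id : List String) (banned_id : List String) (out : Int) : Prop := out = solution_alt user_id banned_id
instance (user_id : List String) (banned_id : List String) (out : Int) : Decidable (Spec_solution user_id banned_id out) := by unfold Spec_solution; infer_instance

-- ===== CLAIM (what is proved, stated in full; the proofs are below) =====
def Claim_equal_solution : Prop := ∀ (user_id : List String) (banned_id : List String), Dom_solution user_id banned_id → Spec_solution user_id banned_id (solution user_id banned_id)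

-- ===== LEMMAS AND PROOFS =====

def tupProd : List (List Int) → List (List Int)
  | [] => [[]]
  | r :: rs => r.flatMap (fun i => (tupProd rs).map (fun t => i :: t))

lemma tupProd_length {rows : List (List Int)} {t : List Int} (h : t ∈ tupProd rows) :
    t.length = rows.length := by
  induction rows generalizing t with
  | nil => simp [tupProd] at h; simp [h]
  | cons r rs ih =>
    simp only [tupProd, List.mem_flatMap, List.mem_map] at h
    obtain ⟨i, _, t', ht', rfl⟩ := h
    simp [ih ht']

lemma ofList_sublist (xs : List Int) :
    (PySem.Set.ofList xs).Sublist xs := by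
  suffices h : ∀ (xs : List Int) (acc : List Int), ∃ ys, List.foldl PySem.Set.add acc xs = acc ++ ys ∧ ys.Sublist xs by
    obtain ⟨ys, h1, h2⟩ := h xs []
    rw [PySem.Set.ofList_eq_foldl, h1]; simpa using h2
  intro xs
  induction xs with
  | nil => exact fun acc => ⟨[], by simp⟩
  | cons x xs ih =>
    intro acc
    by_cases hx : x ∈ acc
    · obtain ⟨ys, h1, h2⟩ := ih acc
      exact ⟨ys, by simp [List.foldl_cons, PySem.Set.add_of_mem hx, h1], h2.cons x⟩
    · obtain ⟨ys, h1, h2⟩ := ih (acc ++ [x])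
      exact ⟨x :: ys, by simp [List.foldl_cons, PySem.Set.add_of_not_mem hx, h1], h2.cons₂ x⟩

lemma ofList_eq_self_of_nodup {xs : List Int} (h : xs.Nodup) : PySem.Set.ofList xs = xs := by
  have hsub := ofList_sublist xs
  have hperm : (PySem.Set.ofList xs).Perm xs :=
    (List.perm_ext_iff_of_nodup (PySem.Set.nodup_ofList xs) h).2 (fun a => PySem.Set.mem_ofList xs a)
  exact hsub.eq_of_length hperm.length_eq

lemma length_ofList_ne_of_not_nodup {xs : List Int} (h : ¬ xs.Nodup) :
    (PySem.Set.ofList xs).length ≠ xs.length := by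
  intro hlen
  exact h ((ofList_sublist xs).eq_of_length hlen ▸ PySem.Set.nodup_ofList xs)

lemma findGo_eq (rows : List (List Int)) : ∀ (num : List (List Int)) (row : Nat) (v : List Int)
    (result : List (List Int)), num.drop row = rows → v.length = num.length → row ≤ num.length →
    findGo (num.length - row) v row num result =
      result ++ (tupProd rows).map (fun t => v.take row ++ t) := by
  induction rows with
  | nil =>
    intro num row v result hdrop hlen hle
    have hrow : row = num.length := le_antisymm hle (by simpa using List.drop_eq_nil_iff.1 hdrop)
    have : num.length - row = 0 := by omega
    rw [this]
    simp [findGo, hrow, tupProd, List.take_of_length_le (le_of_eq hlen)]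
  | cons r rs ih =>
    intro num row v result hdrop hlen hle
    have hrow : row < num.length := by
      by_contra hge
      rw [List.drop_eq_nil_iff.2 (by omega)] at hdrop
      exact List.cons_ne_nil _ _ hdrop.symm
    have hfuel : num.length - row = (num.length - (row + 1)) + 1 := by omega
    rw [hfuel]
    simp only [findGo, if_neg (by omega : ¬ row = num.length)]
    have hget : PySem.List.pyGetD num (row : Int) [] = r := by
      rw [PySem.List.pyGetD_natCast, List.getD_eq_getElem _ _ hrow]
      have h0 : (num.drop row)[0]'(by simp [hdrop]) = num[row + 0]'(by omega) := List.getElem_drop (xs := num) (i := row) (j := 0)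
      simpa [hdrop] using h0.symm
    rw [hget]
    -- inner fold over the row's choices
    have hdrop' : num.drop (row + 1) = rs := by
      have : num.drop (row + 1) = (num.drop row).drop 1 := (List.drop_drop (i := 1) (j := row)).symm
      simp [this, hdrop]
    have inner : ∀ (choices : List Int) (v0 : List Int) (res0 : List (List Int)),
        v0.length = num.length → v0.take row = v.take row →
        (choices.foldl (fun (st : List Int × List (List Int)) i =>
            let v' := st.1.set row i
            (v', findGo (num.length - (row + 1)) v' (row + 1) num st.2)) (v0, res0)).2 =
          res0 ++ choices.flatMap (fun i => (tupProd rs).map (fun t => v.take row ++ i :: t)) := by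
      intro choices
      induction choices with
      | nil => intro v0 res0 _ _; simp
      | cons i cs ihc =>
        intro v0 res0 hv0len hv0take
        simp only [List.foldl_cons]
        have hlt : row < v0.length := hv0len ▸ hrow
        have hset_len : (v0.set row i).length = num.length := by simp [hv0len]
        have hset_take : (v0.set row i).take row = v.take row := by
          rw [← hv0take]; exact List.take_set_of_le (le_refl row)
        rw [ihc (v0.set row i) _ hset_len hset_take]
        rw [ih num (row + 1) (v0.set row i) res0 hdrop' hset_len (by omega)]
        have htake : (v0.set row i).take (row + 1) = v.take row ++ [i] := by
          rw [List.take_add_one, ← hv0take]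
          have h2 : (v0.set row i).take row = v0.take row := List.take_set_of_le (le_refl row)
          simp [h2, List.getElem?_set_self (by simpa using hlt)]
        rw [htake]
        simp [List.flatMap_cons, List.append_assoc]
    rw [inner r v result hlen rfl]
    simp [tupProd, List.map_flatMap, List.map_map, Function.comp_def]

def visitB : List (List Int) → List Int → List (List Int)
  | [], used => [PySem.List.sorted used (fun x => x)]
  | r :: rs, used => r.flatMap (fun i => if i ∈ used then [] else visitB rs (used ++ [i]))

lemma btB_eq (rows : List (List Int)) : ∀ (used : List Int) (seen : PySem.Set (List Int)),
    btB rows used seen = (visitB rows used).foldl PySem.Set.add seen := by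
  induction rows with
  | nil => intro used seen; simp [btB, visitB]
  | cons r rs ih =>
    intro used seen
    simp only [btB, visitB]
    induction r generalizing seen with
    | nil => simp
    | cons i r' ihr =>
      simp only [List.foldl_cons, List.flatMap_cons, List.foldl_append]
      by_cases hi : i ∈ used
      · simp [hi]; exact ihr seen
      · simp only [hi, if_neg, ite_false]
        rw [ih, ihr]

lemma visitB_eq (rows : List (List Int)) : ∀ (used : List Int), used.Nodup →
    visitB rows used =
      ((tupProd rows).filter (fun t => decide (used ++ t).Nodup)).map
        (fun t => PySem.List.sorted (used ++ t) (fun x => x)) := by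
  induction rows with
  | nil => intro used h; simp [visitB, tupProd, h]
  | cons r rs ih =>
    intro used h
    simp only [visitB, tupProd, List.filter_flatMap, List.map_flatMap]
    refine congrArg (fun f => List.flatMap f r) (funext fun i => ?_)
    by_cases hi : i ∈ used
    · simp only [hi, if_pos]
      rw [List.filter_eq_nil_iff.2 ?_, List.map_nil]
      intro t ht
      simp only [List.mem_map] at ht
      obtain ⟨t', _, rfl⟩ := ht
      simp only [decide_eq_true_eq]
      intro hnd
      exact (List.disjoint_of_nodup_append hnd) hi (by simp)
    · simp only [hi, ite_false]
      rw [ih (used ++ [i]) (by simp [List.nodup_append, h]; exact fun a ha he => hi (he ▸ ha))]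
      rw [List.filter_map, List.map_map]
      simp [Function.comp_def, ← List.append_cons]

lemma count_fold (n : Nat) : ∀ (R : List (List Int)) (accA : List (PySem.Set Int))
    (accB : PySem.Set (List Int)),
    (∀ t ∈ R, t.length = n) → (∀ s ∈ accA, s.Nodup) →
    accB = accA.map (fun s => PySem.List.sorted s (fun x => x)) →
    (R.foldl (fun acc i =>
        if (!(acc.any (fun s => PySem.Set.equal s (PySem.Set.ofList i)))) &&
           (PySem.Set.len (PySem.Set.ofList i) == (n : Int)) then acc ++ [PySem.Set.ofList i] else acc) accA).map
        (fun s => PySem.List.sorted s (fun x => x)) =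
      ((R.filter (fun t => decide t.Nodup)).map (fun t => PySem.List.sorted t (fun x => x))).foldl
        PySem.Set.add accB := by
  intro R
  induction R with
  | nil => intro accA accB _ _ hAB; simpa using hAB.symm
  | cons t R ihR =>
    intro accA accB hlen hnd hAB
    by_cases ht : t.Nodup
    · have htemp : PySem.Set.ofList t = t := ofList_eq_self_of_nodup ht
      have hcond2 : (PySem.Set.len (PySem.Set.ofList t) == (n : Int)) = true := by
        simp [PySem.Set.len, htemp, hlen t (by simp)]
      by_cases hmem : ∃ s ∈ accA, PySem.Set.equal s (PySem.Set.ofList t) = true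
      · -- already seen: A skips; B's add is a no-op
        have hany : (accA.any (fun s => PySem.Set.equal s (PySem.Set.ofList t))) = true :=
          List.any_eq_true.2 hmem
        have hinB : PySem.List.sorted t (fun x => x) ∈ accB := by
          obtain ⟨s, hs, hse⟩ := hmem
          rw [htemp] at hse
          have hperm : s.Perm t :=
            (List.perm_ext_iff_of_nodup (hnd s hs) ht).2 (PySem.Set.equal_iff s t |>.1 hse)
          rw [hAB]
          exact List.mem_map.2 ⟨s, hs, (PySem.List.sorted_id_eq_sorted_id_iff_perm s t).2 hperm⟩
        simp only [List.foldl_cons, List.filter_cons, ht, decide_true, List.map_cons, hany,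
          Bool.not_true, Bool.false_and, Bool.false_eq_true, if_false, if_true]
        rw [ihR accA _ (fun u hu => hlen u (by simp [hu])) hnd rfl]
        rw [PySem.Set.add_eq_ite, if_pos hinB, hAB]
      · have hany : (accA.any (fun s => PySem.Set.equal s (PySem.Set.ofList t))) = false := by
          rw [List.any_eq_false]; intro s hs
          exact fun hc => hmem ⟨s, hs, hc⟩
        have hninB : PySem.List.sorted t (fun x => x) ∉ accB := by
          rw [hAB]
          intro hin
          obtain ⟨s, hs, hse⟩ := List.mem_map.1 hin
          have hperm : s.Perm t := (PySem.List.sorted_id_eq_sorted_id_iff_perm s t).1 hse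
          refine hmem ⟨s, hs, ?_⟩
          rw [htemp]
          exact (PySem.Set.equal_iff s t).2 ((List.perm_ext_iff_of_nodup (hnd s hs) ht).1 hperm)
        simp only [List.foldl_cons, List.filter_cons, ht, decide_true, List.map_cons, hany,
          Bool.not_false, Bool.true_and, hcond2, if_true]
        rw [htemp]
        rw [ihR (accA ++ [t]) _ (fun u hu => hlen u (by simp [hu]))
              (by intro s hs; rcases List.mem_append.1 hs with h | h
                  · exact hnd s h
                  · simp at h; subst h; exact ht)
              rfl]
        rw [PySem.Set.add_eq_ite, if_neg hninB, hAB]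
        simp
    · have hcond2 : (PySem.Set.len (PySem.Set.ofList t) == (n : Int)) = false := by
        have h1 := length_ofList_ne_of_not_nodup ht
        simp only [PySem.Set.len, beq_eq_false_iff_ne, ne_eq, Nat.cast_inj]
        intro hc
        exact h1 (hc.trans (hlen t (by simp)).symm)
      simp only [List.foldl_cons, List.filter_cons, ht, decide_false, Bool.false_eq_true,
        if_false, hcond2, Bool.and_false]
      exact ihR accA accB (fun u hu => hlen u (by simp [hu])) hnd hAB

lemma all_range_eq_all_zip : ∀ (x y : List Char), x.length = y.length →
    ((List.range x.length).all (fun m => (x.getD m ' ' == y.getD m ' ') || (y.getD m ' ' == '*'))) =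
    ((x.zip y).all (fun p => (p.1 == p.2) || (p.2 == '*'))) := by
  intro x
  induction x with
  | nil => intro y h; simp
  | cons a x ih =>
    intro y h
    cases y with
    | nil => simp at h
    | cons b y =>
      simp only [List.length_cons, List.range_succ_eq_map, List.all_cons, List.all_map,
        List.zip_cons_cons, List.getD_cons_zero, Function.comp_def, List.getD_cons_succ]
      rw [ih y (by simpa using h)]

lemma cond_eq (u b : String) :
    (((PySem.Str.len u == PySem.Str.len b)) && (compareA u b == true)) = matchesB u b := by
  unfold matchesB compareA
  rw [PySem.Str.len_eq u, PySem.Str.len_eq b]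
  by_cases hl : u.toList.length = b.toList.length
  · have h1 : (((u.toList.length : Int)) == ((b.toList.length : Int))) = true := by simp [hl]
    rw [h1, Bool.true_and, Bool.true_and, beq_true]
    rw [PySem.List.pyRange_zero_natCast, List.all_map]
    rw [← all_range_eq_all_zip u.toList b.toList hl]
    simp [Function.comp_def, PySem.List.pyGetD_natCast, List.getD]
  · have h1 : (((u.toList.length : Int)) == ((b.toList.length : Int))) = false := by
      simp only [beq_eq_false_iff_ne, ne_eq, Nat.cast_inj]; exact hl
    rw [h1, Bool.false_and, Bool.false_and]

lemma foldl_modify_length (c : Int → Bool) (f : List Int → List Int) :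
    ∀ (js : List Int) (num : List (List Int)),
    (js.foldl (fun nm j => if c j then nm.modify j.toNat f else nm) num).length = num.length := by
  intro js
  induction js with
  | nil => intro num; rfl
  | cons j js ih =>
    intro num
    rw [List.foldl_cons, ih]
    by_cases hc : c j <;> simp [hc]

lemma foldl_modify_getD (c : Int → Bool) (f : List Int → List Int) (k : Nat) :
    ∀ (m : Nat) (num : List (List Int)), k < num.length →
    (((List.range m).map (fun t : Nat => (t : Int))).foldl
        (fun nm j => if c j then nm.modify j.toNat f else nm) num).getD k [] =
      if k < m ∧ c (k : Int) then f (num.getD k []) else num.getD k [] := by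
  intro m
  induction m with
  | zero => intro num _; simp
  | succ m ih =>
    intro num hklt
    rw [List.range_succ, List.map_append, List.foldl_append]
    simp only [List.map_cons, List.map_nil, List.foldl_cons, List.foldl_nil]
    set P := ((List.range m).map (fun t : Nat => (t : Int))).foldl
        (fun nm j => if c j then nm.modify j.toNat f else nm) num with hPdef
    have hPlen : P.length = num.length := foldl_modify_length c f _ num
    by_cases hc : c (m : Int)
    · rw [if_pos hc]
      rw [List.getD, List.getElem?_modify, Int.toNat_natCast]
      by_cases hk : m = k
      · subst hk
        simp only [if_true]
        rw [List.getElem?_eq_getElem (hPlen ▸ hklt)]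
        have h3 : P.getD m [] = num.getD m [] := by
          rw [ih num hklt, if_neg (fun h => absurd h.1 (lt_irrefl m))]
        have h2 : P[m]'(hPlen ▸ hklt) = num.getD m [] := by
          rw [← h3]; exact (List.getD_eq_getElem P [] (hPlen ▸ hklt)).symm
        simp [h2, Nat.lt_succ_self, hc, List.getD]
      · simp only [if_neg hk]
        have h2 : ((fun a => a) <$> P[k]?).getD [] = P.getD k [] := by
          simp [List.getD]
        rw [h2, ih num hklt]
        have h1 : (k < m + 1 ∧ c (k : Int)) ↔ (k < m ∧ c (k : Int)) := by
          constructor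
          · rintro ⟨h3, h4⟩
            exact ⟨by omega, h4⟩
          · rintro ⟨h3, h4⟩; exact ⟨by omega, h4⟩
        simp only [h1]
    · rw [if_neg hc, ih num hklt]
      have h1 : (k < m + 1 ∧ c (k : Int)) ↔ (k < m ∧ c (k : Int)) := by
        constructor
        · rintro ⟨h3, h4⟩
          refine ⟨?_, h4⟩
          rcases Nat.lt_succ_iff_lt_or_eq.1 h3 with h5 | h5
          · exact h5
          · subst h5; exact absurd h4 hc
        · rintro ⟨h3, h4⟩; exact ⟨by omega, h4⟩
      simp only [h1]

def condA (user_id : List String) (banned_id : List String) (i j : Int) : Bool :=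
  (PySem.Str.len (PySem.List.pyGetD user_id i "") ==
    PySem.Str.len (PySem.List.pyGetD banned_id j "")) &&
  (compareA (PySem.List.pyGetD user_id i "") (PySem.List.pyGetD banned_id j "") == true)

lemma pyRange_len (b : List String) :
    PySem.List.pyRange 0 (PySem.List.len b) 1 = (List.range b.length).map (fun t : Nat => (t : Int)) := by
  have := PySem.List.pyRange_zero_natCast b.length
  simpa [PySem.List.len] using this

lemma outer_length (u b : List String) : ∀ (I : List Int) (num : List (List Int)),
    (I.foldl (fun nm i => (PySem.List.pyRange 0 (PySem.List.len b) 1).foldl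
      (fun nm j => if condA u b i j then nm.modify j.toNat (fun row => row ++ [i]) else nm) nm) num).length
      = num.length := by
  intro I
  induction I with
  | nil => intro num; rfl
  | cons i I ih =>
    intro num
    rw [List.foldl_cons, ih, pyRange_len, foldl_modify_length]

lemma outer_getD (u b : List String) (k : Nat) : ∀ (I : List Int) (num : List (List Int)),
    k < num.length → num.length = b.length →
    (I.foldl (fun nm i => (PySem.List.pyRange 0 (PySem.List.len b) 1).foldl
      (fun nm j => if condA u b i j then nm.modify j.toNat (fun row => row ++ [i]) else nm) nm) num).getD k []
      = num.getD k [] ++ I.filter (fun i => condA u b i (k : Int)) := by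
  intro I
  induction I with
  | nil => intro num _ _; simp
  | cons i I ih =>
    intro num hk hlen
    rw [List.foldl_cons, pyRange_len]
    have hlen' : (((List.range b.length).map (fun t : Nat => (t : Int))).foldl
        (fun nm j => if condA u b i j then nm.modify j.toNat (fun row => row ++ [i]) else nm) num).length = num.length :=
      foldl_modify_length _ _ _ num
    rw [← pyRange_len] at hlen' ⊢
    rw [ih _ (by rw [pyRange_len, foldl_modify_length]; exact hk) (hlen' ▸ hlen)]
    rw [pyRange_len, foldl_modify_getD _ _ _ _ num hk]
    have hkb : k < b.length := hlen ▸ hk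
    by_cases hc : condA u b i (k : Int)
    · rw [if_pos ⟨hkb, hc⟩, List.filter_cons_of_pos (p := fun i => condA u b i (k : Int)) hc,
        List.append_assoc]
      simp
    · rw [if_neg (fun h => absurd h.2 (by simp [hc])),
        List.filter_cons_of_neg (p := fun i => condA u b i (k : Int)) (by simp [hc])]

lemma numA_eq_candB (u b : List String) : numA u b = candB u b := by
  have hA : numA u b = (PySem.List.pyRange 0 (PySem.List.len u) 1).foldl
      (fun nm i => (PySem.List.pyRange 0 (PySem.List.len b) 1).foldl
        (fun nm j => if condA u b i j then nm.modify j.toNat (fun row => row ++ [i]) else nm) nm)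
      ((PySem.List.pyRange 0 (PySem.List.len b) 1).map (fun _ => ([] : List Int))) := rfl
  have hinitlen : ((PySem.List.pyRange 0 (PySem.List.len b) 1).map (fun _ => ([] : List Int))).length
      = b.length := by
    rw [List.length_map, pyRange_len, List.length_map, List.length_range]
  have hlenA : (numA u b).length = b.length := by rw [hA, outer_length]; exact hinitlen
  have hlenC : (candB u b).length = b.length := by simp [candB]
  apply List.ext_getElem (by rw [hlenA, hlenC])
  intro k h1 h2
  have hkb : k < b.length := hlenA ▸ h1
  have hinit0 : ((PySem.List.pyRange 0 (PySem.List.len b) 1).map (fun _ => ([] : List Int))).getD k []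
      = ([] : List Int) := by
    rw [List.getD]
    rw [List.getElem?_map]
    cases (PySem.List.pyRange 0 (PySem.List.len b) 1)[k]? <;> simp
  have hL : (numA u b)[k]'h1 =
      (PySem.List.pyRange 0 (PySem.List.len u) 1).filter (fun i => condA u b i (k : Int)) := by
    rw [← List.getD_eq_getElem _ [] h1, hA, outer_getD u b k _ _ (hinitlen ▸ hkb) hinitlen,
      hinit0, List.nil_append]
  have hR : (candB u b)[k]'h2 =
      ((PySem.List.enumerate u).filter (fun p => matchesB p.2 (b[k]'hkb))).map (fun p => p.1) := by
    unfold candB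
    rw [List.getElem_map]
  rw [hL, hR]
  rw [PySem.List.enumerate_eq_map_pyRange u ""]
  rw [List.filter_map, List.map_map]
  rw [show ((fun p : Int × String => p.1) ∘ (fun j : Int => (j, PySem.List.pyGetD u j ""))) =
    (fun j : Int => j) from rfl]
  rw [List.map_id']
  apply List.filter_congr
  intro i hi
  show condA u b i (k : Int) = matchesB (PySem.List.pyGetD u i "") (b[k]'hkb)
  unfold condA
  rw [cond_eq]
  rw [PySem.List.pyGetD_natCast, List.getD_eq_getElem _ _ hkb]

lemma solution_eq (u b : List String) : solution u b = solution_alt u b := by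
  have hnum : numA u b = candB u b := numA_eq_candB u b
  have hlennum : (numA u b).length = b.length := by rw [hnum]; simp [candB]
  have hfind : findA (List.replicate (numA u b).length 0) 0 (numA u b) [] = tupProd (numA u b) := by
    unfold findA
    rw [findGo_eq (numA u b) (numA u b) 0 (List.replicate (numA u b).length 0) []
      List.drop_zero (by simp) (Nat.zero_le _)]
    simp
  have hB : btB (candB u b) [] [] =
      (((tupProd (candB u b)).filter (fun t => decide t.Nodup)).map
        (fun t => PySem.List.sorted t (fun x => x))).foldl PySem.Set.add [] := by
    rw [btB_eq, visitB_eq _ [] List.nodup_nil]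
    simp only [List.nil_append]
    rfl
  have hcount := count_fold b.length (tupProd (numA u b)) [] []
    (fun t ht => (tupProd_length ht).trans hlennum) (by simp) (by simp)
  simp only [solution, solution_alt, PySem.List.len]
  rw [hfind, hB, ← hnum]
  have h2 := congrArg List.length hcount
  rw [List.length_map] at h2
  exact_mod_cast h2

-- ===== VERDICT (by name: the statement is the Claim_ definition above) =====
theorem solution_spec : Claim_equal_solution := fun u b _ => solution_eq u b
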